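-- pv_equiv track=rewrite | github.com/wzygxr/shuati | class181_AdvancedAlgorithmsAndDataStructures/leetcode_1521_find_value_of_partition.py | find_value_of_partition
-- ===== SOURCE A (Python) =====
-- def find_value_of_partition(nums, queries):
--     """
--     计算每个查询的分区值
--
--     Args:
--         nums: 输入数组
--         queries: 查询数组
--
--     Returns:
--         每个查询的结果数组
--     """
--     # 对数组进行排序
--     nums.sort()
--
--     # 计算前缀和
--     prefix_sum = [0]
--     for num in nums:
--         prefix_sum.append(prefix_sum[-1] + num)
--
--     result = []
--
--     # 处理每个查询
--     for query in queries:
--         # 使用二分查找找到分割点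
--         left, right = 0, len(nums)
--         while left < right:
--             mid = left + (right - left) // 2
--             if nums[mid] <= query:
--                 left = mid + 1
--             else:
--                 right = mid
--
--         # 计算两个数组的和
--         sum_a = prefix_sum[left]
--         sum_b = prefix_sum[-1] - sum_a
--
--         # 返回差值的绝对值
--         result.append(abs(sum_a - sum_b))
--
--     return result
-- ===== SOURCE B (Python) =====
-- def find_value_of_partition(nums, queries):
--     # Return-value equivalent to A; note A additionally sorts nums in place, B leaves nums untouched.
--     total = sum(nums)
--     return [abs(2 * sum(x for x in nums if x <= q) - total) for q in queries]
-- ===== Notes on version B (the rewrite author's own statement) =====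
-- stated objective: simpler
-- what changed: Replaces sort + prefix-sum array + hand-written per-query binary search by a direct per-query linear sum of the elements <= query (order-independent, so no sorting at all); A's in-place nums.sort() side effect is not reproduced, equivalence is about the return value.
import Mathlib
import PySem

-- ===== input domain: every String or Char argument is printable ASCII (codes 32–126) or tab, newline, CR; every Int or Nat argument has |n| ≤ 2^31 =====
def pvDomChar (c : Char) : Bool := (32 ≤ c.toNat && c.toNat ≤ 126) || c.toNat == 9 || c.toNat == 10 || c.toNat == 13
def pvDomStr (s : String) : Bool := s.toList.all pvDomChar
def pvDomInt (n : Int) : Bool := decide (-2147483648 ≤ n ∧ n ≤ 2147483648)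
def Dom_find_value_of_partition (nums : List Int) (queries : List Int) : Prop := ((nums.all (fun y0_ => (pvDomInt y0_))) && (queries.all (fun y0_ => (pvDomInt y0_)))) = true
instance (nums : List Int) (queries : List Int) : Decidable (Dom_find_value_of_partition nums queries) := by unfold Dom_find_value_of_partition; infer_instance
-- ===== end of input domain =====

-- B replaces A's sort + prefix-sum array + hand-written per-query binary search by a direct
-- per-query linear sum of the elements ≤ query (simpler; return-value equivalence only:
-- A sorts nums in place, B does not mutate nums).


-- ===== PORT A =====
-- A's hand-written binary-search loop (while left < right: …), as a recursion on right - left.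
def pvBisect (xs : List Int) (q : Int) (left right : Int) : Int :=
  if _h : left < right then
    let mid := left + PySem.Int.floordiv (right - left) 2
    -- nums[mid]: index is always in range here (0 ≤ left ≤ mid < right ≤ len), so getD 0 is exact
    if (PySem.List.pyGetD xs mid 0) ≤ q then pvBisect xs q (mid + 1) right
    else pvBisect xs q left mid
  else left
termination_by (right - left).toNat
decreasing_by
  all_goals
    have h2 : PySem.Int.floordiv (right - left) 2 = (right - left) / 2 :=
      PySem.Int.floordiv_eq_ediv_of_pos (by omega)
    simp only [h2]
    omega

def find_value_of_partition (nums : List Int) (queries : List Int) : List Int :=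
  let sortedNums := PySem.List.sorted nums (fun x => x) false   -- nums.sort() (A mutates nums in place)
  -- prefix_sum[-1] is defined (the list starts as [0]), so getD 0 is exact
  let prefix_sum := sortedNums.foldl
    (fun ps num => ps ++ [(PySem.List.pyGetD ps (-1) 0) + num]) [0]
  queries.foldl (fun result query =>
    let left := pvBisect sortedNums query 0 (sortedNums.length : Int)
    let sum_a := PySem.List.pyGetD prefix_sum left 0          -- 0 ≤ left ≤ len nums < len prefix_sum
    let sum_b := (PySem.List.pyGetD prefix_sum (-1) 0) - sum_a
    result ++ [|sum_a - sum_b|]) []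

-- ===== PORT B =====
def find_value_of_partition_alt (nums : List Int) (queries : List Int) : List Int :=
  let total := nums.foldl (· + ·) 0
  queries.map (fun q => |2 * nums.foldl (fun s x => if x ≤ q then s + x else s) 0 - total|)

-- ===== PRECONDITION & SPEC =====
def Spec_find_value_of_partition (nums : List Int) (queries : List Int) (out : List Int) : Prop := out = find_value_of_partition_alt nums queries
instance (nums : List Int) (queries : List Int) (out : List Int) : Decidable (Spec_find_value_of_partition nums queries out) := by unfold Spec_find_value_of_partition; infer_instance

-- ===== CLAIM (what is proved, stated in full; the proofs are below) =====
def Claim_equal_find_value_of_partition : Prop := ∀ (nums : List Int) (queries : List Int), Dom_find_value_of_partition nums queries → Spec_find_value_of_partition nums queries (find_value_of_partition nums queries)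

-- ===== LEMMAS AND PROOFS =====


theorem pvGetD_last (l : List Int) (h : l ≠ []) :
    PySem.List.pyGetD l (-1) 0 = l.getLast h := by
  have hl : 0 < l.length := List.length_pos_iff.mpr h
  simp only [PySem.List.pyGetD, PySem.List.pyGet?, PySem.List.pyIdx?]
  have : ¬ (0:Int) ≤ -1 := by omega
  rw [if_neg this, if_pos (by omega : -(l.length:Int) ≤ -1)]
  simp only [Option.bind]
  rw [List.getLast_eq_getElem]
  have : (-(-1:Int)).toNat = 1 := by decide
  rw [this]
  rw [List.getElem?_eq_getElem (by omega)]
  rfl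

theorem pvPrefix_eq (xs : List Int) :
    xs.foldl (fun ps num => ps ++ [(PySem.List.pyGetD ps (-1) 0) + num]) [0]
      = (List.range (xs.length + 1)).map (fun k => ((xs.take k).sum : Int)) := by
  induction xs using List.reverseRecOn with
  | nil => simp
  | append_singleton ys y ih =>
    rw [List.foldl_append, ih]
    simp only [List.foldl_cons, List.foldl_nil]
    have hne : (List.range (ys.length + 1)).map (fun k => ((ys.take k).sum : Int)) ≠ [] := by
      simp
    rw [pvGetD_last _ hne]
    rw [List.getLast_eq_getElem]
    simp only [List.length_map, List.length_range]
    rw [List.getElem_map, List.getElem_range]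
    have h1 : ys.take (ys.length + 1 - 1) = ys := by simp
    rw [h1]
    have h2 : (ys ++ [y]).length + 1 = (ys.length + 1) + 1 := by simp
    symm
    rw [h2, List.range_succ, List.map_append, List.map_singleton]
    congr 1
    · apply List.map_congr_left
      intro k hk
      simp only [List.mem_range] at hk
      rw [List.take_append_of_le_length (by omega)]
    · simp

theorem pvBisect_inv (xs : List Int) (q : Int) (hs : xs.Pairwise (· ≤ ·)) :
    ∀ (n : Nat) (left right : Int), (right - left).toNat = n → 0 ≤ left → left ≤ right →
    right ≤ xs.length →
    (∀ j : Nat, (hj : j < xs.length) → (j : Int) < left → xs[j] ≤ q) →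
    (∀ j : Nat, (hj : j < xs.length) → right ≤ (j : Int) → q < xs[j]) →
    ∃ r : Nat, pvBisect xs q left right = (r : Int) ∧ r ≤ xs.length ∧
      (∀ j : Nat, (hj : j < xs.length) → j < r → xs[j] ≤ q) ∧
      (∀ j : Nat, (hj : j < xs.length) → r ≤ j → q < xs[j]) := by
  intro n
  induction n using Nat.strong_induction_on with
  | _ n ih =>
    intro left right hn h0 hlr hrlen hL hR
    rw [pvBisect]
    by_cases h : left < right
    · rw [dif_pos h]
      have hfd : PySem.Int.floordiv (right - left) 2 = (right - left) / 2 :=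
        PySem.Int.floordiv_eq_ediv_of_pos (by omega)
      simp only [hfd]
      set m : Int := left + (right - left) / 2 with hm
      have hml : left ≤ m := by omega
      have hmr : m < right := by omega
      have hm0 : 0 ≤ m := by omega
      have hmlen : m < (xs.length : Int) := by omega
      rw [PySem.List.pyGetD_eq_getElem xs 0 hm0 hmlen]
      have hsg : ∀ (i j : Nat) (hi : i < xs.length) (hj : j < xs.length), i ≤ j → xs[i] ≤ xs[j] := by
        intro i j hi hj hij
        rcases Nat.lt_or_ge i j with h' | h'
        · exact (List.pairwise_iff_getElem.mp hs) i j hi hj h'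
        · have : i = j := by omega
          subst this; rfl
      by_cases hc : xs[m.toNat] ≤ q
      · rw [if_pos hc]
        apply ih (right - (m + 1)).toNat (by omega) (m + 1) right rfl (by omega) (by omega) hrlen
        · intro j hj hjm
          have : j ≤ m.toNat := by omega
          exact le_trans (hsg j m.toNat hj (by omega) this) hc
        · exact hR
      · rw [if_neg hc]
        apply ih (m - left).toNat (by omega) left m rfl h0 (by omega) (by omega) hL
        intro j hj hmj
        have : xs[m.toNat] ≤ xs[j] := hsg m.toNat j (by omega) hj (by omega)
        omega
    · rw [dif_neg h]
      have : left = right := by omega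
      subst this
      refine ⟨left.toNat, by omega, by omega, ?_, ?_⟩
      · intro j hj hjr; exact hL j hj (by omega)
      · intro j hj hrj; exact hR j hj (by omega)

theorem pvBisect_spec (xs : List Int) (q : Int) (hs : xs.Pairwise (· ≤ ·)) :
    ∃ r : Nat, pvBisect xs q 0 (xs.length : Int) = (r : Int) ∧ r ≤ xs.length ∧
      (∀ j : Nat, (hj : j < xs.length) → j < r → xs[j] ≤ q) ∧
      (∀ j : Nat, (hj : j < xs.length) → r ≤ j → q < xs[j]) := by
  apply pvBisect_inv xs q hs (xs.length : Int).toNat 0 (xs.length : Int) (by omega) le_rfl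
    (by omega) le_rfl
  · intro j hj hj0; omega
  · intro j hj hlj; omega

theorem pvTake_eq_filter (xs : List Int) (q : Int) (r : Nat) (hr : r ≤ xs.length)
    (h1 : ∀ j : Nat, (hj : j < xs.length) → j < r → xs[j] ≤ q)
    (h2 : ∀ j : Nat, (hj : j < xs.length) → r ≤ j → q < xs[j]) :
    xs.take r = xs.filter (fun x => x ≤ q) := by
  induction xs generalizing r with
  | nil => simp
  | cons a tl ih =>
    cases r with
    | zero =>
      simp only [List.take_zero]
      symm
      rw [List.filter_eq_nil_iff]
      intro x hx
      obtain ⟨j, hj, hxe⟩ := List.mem_iff_getElem.mp hx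
      have := h2 j hj (by omega)
      simp only [hxe] at this
      simp only [decide_eq_true_eq]
      omega
    | succ s =>
      have ha : a ≤ q := h1 0 (by simp) (by omega)
      rw [List.take_succ_cons, List.filter_cons_of_pos (by simpa using ha)]
      congr 1
      apply ih s (by simpa using hr)
      · intro j hj hjs
        have := h1 (j + 1) (by simpa using Nat.succ_lt_succ hj) (by omega)
        simpa using this
      · intro j hj hsj
        have := h2 (j + 1) (by simpa using Nat.succ_lt_succ hj) (by omega)
        simpa using this


theorem pvFoldl_filter (xs : List Int) (q : Int) (s : Int) :
    xs.foldl (fun s x => if x ≤ q then s + x else s) s = s + (xs.filter (fun x => x ≤ q)).sum := by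
  induction xs generalizing s with
  | nil => simp
  | cons a tl ih =>
    by_cases h : a ≤ q
    · simp [h, ih, List.sum_cons]; ring
    · simp [h, ih]

-- ===== VERDICT (by name: the statement is the Claim_ definition above) =====
theorem find_value_of_partition_spec : Claim_equal_find_value_of_partition := by
  intro nums queries _
  unfold Spec_find_value_of_partition find_value_of_partition find_value_of_partition_alt
  set xs := PySem.List.sorted nums (fun x => x) false with hxs
  have hs : xs.Pairwise (· ≤ ·) := PySem.List.sorted_pairwise nums (fun x => x)
  have hperm : xs.Perm nums := PySem.List.sorted_perm nums (fun x => x) false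
  rw [PySem.List.foldl_append_singleton_eq_map
    (fun query =>
      |PySem.List.pyGetD (xs.foldl (fun ps num => ps ++ [(PySem.List.pyGetD ps (-1) 0) + num]) [0])
          (pvBisect xs query 0 (xs.length : Int)) 0 -
        ((PySem.List.pyGetD (xs.foldl (fun ps num => ps ++ [(PySem.List.pyGetD ps (-1) 0) + num]) [0]) (-1) 0) -
          PySem.List.pyGetD (xs.foldl (fun ps num => ps ++ [(PySem.List.pyGetD ps (-1) 0) + num]) [0])
            (pvBisect xs query 0 (xs.length : Int)) 0)|) queries []]
  simp only [List.nil_append]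
  apply List.map_congr_left
  intro q _
  obtain ⟨r, hre, hrle, hA, hB⟩ := pvBisect_spec xs q hs
  rw [hre, pvPrefix_eq]
  set pfx := (List.range (xs.length + 1)).map (fun k => ((xs.take k).sum : Int)) with hpfx
  have hpne : pfx ≠ [] := by simp [hpfx]
  have hsum_a : PySem.List.pyGetD pfx (r : Int) 0 = (xs.take r).sum := by
    rw [PySem.List.pyGetD_eq_getElem pfx 0 (by omega)
      (by simp [hpfx]; omega)]
    simp [hpfx]
  have htot : PySem.List.pyGetD pfx (-1) 0 = xs.sum := by
    rw [pvGetD_last pfx hpne, List.getLast_eq_getElem]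
    simp [hpfx]
  rw [hsum_a, htot, pvTake_eq_filter xs q r hrle hA hB]
  have hfs : (xs.filter (fun x => x ≤ q)).sum = (nums.filter (fun x => x ≤ q)).sum :=
    (hperm.filter _).sum_eq
  have hts : xs.sum = nums.sum := hperm.sum_eq
  rw [hfs, hts, pvFoldl_filter nums q 0, ← List.sum_eq_foldl]
  congr 1
  ring
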